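-- pv_equiv track=rewrite | github.com/cemde/CopySyntax | literal_copy/sequence.py | _str_sequence
-- ===== SOURCE A (Python) =====
-- from typing import Union, Any, List
-- import string
--
-- def _str_sequence(length: int) -> List[str]:
--     pool = lambda i: [x * i for x in list(string.ascii_letters)]
--     n_pool = len(pool(1))
--     result = []
--     step = 1
--     while 0 < length:
--         if length // n_pool > 0:
--             l = n_pool
--         else:
--             l = length % n_pool
--         result.extend(pool(step)[:l])
--         length -= l
--         step += 1
--     return result
-- ===== SOURCE B (Python) =====
-- import string
-- from typing import List
--
--
-- def _str_sequence(length: int) -> List[str]: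
--     # Each output element computed directly from its index: letter i % 52,
--     # repeated i // 52 + 1 times -- one flat pass, no block loop or slicing.
--     return [string.ascii_letters[i % 52] * (i // 52 + 1) for i in range(length)]
-- ===== Notes on version B (the rewrite author's own statement) =====
-- stated objective: simpler
-- what changed: Replaced A's while-loop that builds blocks of 52 (recreating and slicing the repeated-letter pool each step) by a single index-driven comprehension computing element i as ascii_letters[i % 52] * (i // 52 + 1).
import Mathlib
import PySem

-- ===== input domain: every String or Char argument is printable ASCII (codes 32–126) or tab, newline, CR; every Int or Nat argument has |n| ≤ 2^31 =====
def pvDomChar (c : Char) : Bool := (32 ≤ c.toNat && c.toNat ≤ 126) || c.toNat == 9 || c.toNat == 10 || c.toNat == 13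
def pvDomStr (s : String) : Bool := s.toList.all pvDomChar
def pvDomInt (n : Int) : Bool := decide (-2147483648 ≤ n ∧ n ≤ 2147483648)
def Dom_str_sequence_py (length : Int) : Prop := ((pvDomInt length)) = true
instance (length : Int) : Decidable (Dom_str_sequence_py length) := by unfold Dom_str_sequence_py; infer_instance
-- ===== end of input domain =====

-- B replaces A's block-of-52 extend loop (pool rebuild + slice each step) by one flat
-- index-driven pass: element i is ascii_letters[i % 52] repeated i // 52 + 1 times (simpler).

-- string.ascii_letters
def pvLetters : List Char := "abcdefghijklmnopqrstuvwxyzABCDEFGHIJKLMNOPQRSTUVWXYZ".toList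

-- ===== PORT A =====
-- pool = lambda i: [x * i for x in list(string.ascii_letters)]
def pvPool (i : Int) : List String := pvLetters.map (fun x => String.mk (PySem.List.pyRepeat [x] i))

-- n_pool = len(pool(1))
def pvNPool : Int := (pvPool 1).length

-- the while loop ('l' inlined at its two uses)
def pvLoopA (length step : Int) (result : List String) : List String :=
  if _h : 0 < length then
    pvLoopA
      (length - (if PySem.Int.floordiv length pvNPool > 0 then pvNPool else PySem.Int.mod length pvNPool))
      (step + 1)
      (result ++ PySem.List.slice (pvPool step) none
        (some (if PySem.Int.floordiv length pvNPool > 0 then pvNPool else PySem.Int.mod length pvNPool)))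
  else result
termination_by length.toNat
decreasing_by
  have hn : pvNPool = 52 := by decide
  simp only [hn, PySem.Int.floordiv, PySem.Int.mod, Int.fdiv_eq_ediv, Int.fmod_eq_emod] at *
  split_ifs at * <;> omega

def str_sequence_py (length : Int) : List String := pvLoopA length 1 []

-- ===== PORT B =====
def str_sequence_py_alt (length : Int) : List String :=
  (PySem.List.pyRange 0 length 1).map (fun i =>
    match PySem.Str.pyGet? "abcdefghijklmnopqrstuvwxyzABCDEFGHIJKLMNOPQRSTUVWXYZ" (PySem.Int.mod i 52) with
    | some c => String.mk (PySem.List.pyRepeat [c] (PySem.Int.floordiv i 52 + 1))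
    | none => "")  -- unreachable: 0 ≤ i % 52 < 52 is always in range

-- ===== PRECONDITION & SPEC =====
def Spec_str_sequence_py (length : Int) (out : List String) : Prop := out = str_sequence_py_alt length
instance (length : Int) (out : List String) : Decidable (Spec_str_sequence_py length out) := by unfold Spec_str_sequence_py; infer_instance

-- ===== CLAIM (what is proved, stated in full; the proofs are below) =====
def Claim_equal_str_sequence_py : Prop := ∀ (length : Int), Dom_str_sequence_py length → Spec_str_sequence_py length (str_sequence_py length)

-- ===== LEMMAS AND PROOFS =====

-- the common closed form: element k is letter k % 52 repeated (step + k / 52) times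
def pvSpecFun (step k : Nat) : String :=
  String.mk (List.replicate (step + k / 52) (pvLetters.getD (k % 52) 'a'))

theorem pvNPool_eq : pvNPool = 52 := by decide

theorem pvLetters_len : pvLetters.length = 52 := by decide

theorem pvPool_eq (s : Int) :
    pvPool s = (List.range 52).map (fun k => String.mk (List.replicate s.toNat (pvLetters.getD k 'a'))) := by
  rw [pvPool]
  conv_lhs => rw [show pvLetters = (List.range 52).map (fun k => pvLetters.getD k 'a') from by decide]
  simp [List.map_map, PySem.List.pyRepeat_singleton, Function.comp]

theorem pvSpecFun_shift (s k : Nat) : pvSpecFun s (52 + k) = pvSpecFun (s + 1) k := by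
  unfold pvSpecFun
  rw [show (52 + k) % 52 = k % 52 by omega, show s + (52 + k) / 52 = s + 1 + k / 52 by omega]

theorem pvSpecFun_small (s k : Nat) (hk : k < 52) :
    pvSpecFun s k = String.mk (List.replicate s (pvLetters.getD k 'a')) := by
  unfold pvSpecFun
  rw [Nat.div_eq_of_lt hk, Nat.mod_eq_of_lt hk, Nat.add_zero]

theorem pvLoopA_eq (length step : Int) (result : List String) (hs : 1 ≤ step) :
    pvLoopA length step result = result ++ (List.range length.toNat).map (pvSpecFun step.toNat) := by
  rw [pvLoopA]
  by_cases h : 0 < length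
  · rw [dif_pos h]
    by_cases hc : PySem.Int.floordiv length pvNPool > 0
    · -- full block of 52
      have h52 : (52 : Int) ≤ length := by
        simp only [pvNPool_eq, PySem.Int.floordiv, Int.fdiv_eq_ediv] at hc
        split_ifs at hc <;> omega
      have hif : (if PySem.Int.floordiv length pvNPool > 0 then pvNPool
          else PySem.Int.mod length pvNPool) = 52 := by
        rw [if_pos hc, pvNPool_eq]
      rw [hif, pvLoopA_eq (length - 52) (step + 1) _ (by omega),
        PySem.List.slice_to _ (by omega), show ((52 : Int)).toNat = 52 from rfl]
      have htake : (pvPool step).take 52 = pvPool step := by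
        apply List.take_of_length_le
        rw [pvPool, List.length_map, pvLetters_len]
      rw [htake, pvPool_eq, List.append_assoc]
      congr 1
      rw [show length.toNat = 52 + (length - 52).toNat by omega, List.range_add,
        List.map_append, List.map_map]
      congr 1
      · refine List.map_congr_left fun k _ => ?_
        show pvSpecFun (step + 1).toNat k = pvSpecFun step.toNat (52 + k)
        rw [pvSpecFun_shift, show (step + 1).toNat = step.toNat + 1 by omega]
    · -- last partial block: l = length % 52 = length
      have hlt : length < 52 := by
        simp only [pvNPool_eq, PySem.Int.floordiv, Int.fdiv_eq_ediv] at hc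
        split_ifs at hc <;> omega
      have hmod : PySem.Int.mod length pvNPool = length := by
        simp only [pvNPool_eq, PySem.Int.mod, Int.fmod_eq_emod]
        split_ifs <;> omega
      have hif : (if PySem.Int.floordiv length pvNPool > 0 then pvNPool
          else PySem.Int.mod length pvNPool) = length := by
        rw [if_neg hc]; exact hmod
      rw [hif, sub_self, pvLoopA_eq 0 (step + 1) _ (by omega)]
      simp only [Int.toNat_zero, List.range_zero, List.map_nil, List.append_nil]
      rw [PySem.List.slice_to _ (by omega), pvPool_eq, ← List.map_take, List.take_range,
        show min length.toNat 52 = length.toNat by omega]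
      congr 1
      exact List.map_congr_left fun k hk =>
        ((pvSpecFun_small _ _ (by have := List.mem_range.mp hk; omega)).symm)
  · rw [dif_neg h, show length.toNat = 0 by omega]
    simp
termination_by length.toNat
decreasing_by
  all_goals simp only [pvNPool_eq, PySem.Int.floordiv, PySem.Int.mod, Int.fdiv_eq_ediv,
    Int.fmod_eq_emod] at *
  all_goals split_ifs at * <;> omega

theorem pvAlt_eq (length : Int) :
    str_sequence_py_alt length = (List.range length.toNat).map (pvSpecFun 1) := by
  rw [str_sequence_py_alt, PySem.List.pyRange_one, List.map_map,
    show ((length - 0).toNat) = length.toNat by omega]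
  refine List.map_congr_left fun k hk => ?_
  have hk52 : k % 52 < 52 := Nat.mod_lt _ (by omega)
  have hmod : PySem.Int.mod (0 + (k : Int)) 52 = ((k % 52 : Nat) : Int) := by
    simp only [PySem.Int.mod, Int.fmod_eq_emod]
    split_ifs <;> omega
  have hdiv : PySem.Int.floordiv (0 + (k : Int)) 52 + 1 = ((k / 52 + 1 : Nat) : Int) := by
    simp only [PySem.Int.floordiv, Int.fdiv_eq_ediv]
    split_ifs <;> omega
  show (match PySem.Str.pyGet? "abcdefghijklmnopqrstuvwxyzABCDEFGHIJKLMNOPQRSTUVWXYZ"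
      (PySem.Int.mod (0 + (k : Int)) 52) with
    | some c => String.mk (PySem.List.pyRepeat [c] (PySem.Int.floordiv (0 + (k : Int)) 52 + 1))
    | none => "") = pvSpecFun 1 k
  rw [hmod, hdiv, PySem.Str.pyGet?_natCast,
    show ("abcdefghijklmnopqrstuvwxyzABCDEFGHIJKLMNOPQRSTUVWXYZ" : String).toList = pvLetters from by decide,
    List.getElem?_eq_getElem (by rw [pvLetters_len]; exact hk52)]
  simp only [PySem.List.pyRepeat_singleton, Int.toNat_natCast]
  unfold pvSpecFun
  refine congrArg String.mk ?_
  rw [List.getD_eq_getElem _ _ (by rw [pvLetters_len]; exact hk52),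
    show 1 + k / 52 = k / 52 + 1 by omega]

-- ===== VERDICT (by name: the statement is the Claim_ definition above) =====
theorem str_sequence_py_spec : Claim_equal_str_sequence_py := by
  intro length _
  unfold Spec_str_sequence_py str_sequence_py
  rw [pvLoopA_eq _ _ _ (le_refl 1), pvAlt_eq]
  simp
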